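-- pv_equiv track=rewrite | github.com/m7onov/leetcode | backtracking/generate_parantheses.py | check
-- ===== SOURCE A (Python) =====
-- def check(comb):
--     srepr = []
--     counter = 0
--     for i in comb:
--         if i == '0':
--             srepr.append(')')
--             counter -= 1
--         else:
--             srepr.append('(')
--             counter += 1
--         if counter < 0:
--             return None
--
--     if counter == 0:
--         return ''.join(srepr)
--     else:
--         return None
-- ===== SOURCE B (Python) =====
-- def check(comb):
--     # build the prefix-balance table first, then reduce; output built separately by a comprehension
--     prefix = []
--     total = 0
--     for c in comb:
--         total += -1 if c == '0' else 1
--         prefix.append(total)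
--     if total != 0 or any(p < 0 for p in prefix):
--         return None
--     return ''.join(')' if c == '0' else '(' for c in comb)
-- ===== Notes on version B (the rewrite author's own statement) =====
-- stated objective: alternative
-- what changed: Replaces A's interleaved single pass with early return by a build-then-reduce decomposition: a prefix-balance table is built first, validity is decided by one reduction over it (total != 0 or any negative prefix), and the output string is produced by a separate comprehension.
import Mathlib
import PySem

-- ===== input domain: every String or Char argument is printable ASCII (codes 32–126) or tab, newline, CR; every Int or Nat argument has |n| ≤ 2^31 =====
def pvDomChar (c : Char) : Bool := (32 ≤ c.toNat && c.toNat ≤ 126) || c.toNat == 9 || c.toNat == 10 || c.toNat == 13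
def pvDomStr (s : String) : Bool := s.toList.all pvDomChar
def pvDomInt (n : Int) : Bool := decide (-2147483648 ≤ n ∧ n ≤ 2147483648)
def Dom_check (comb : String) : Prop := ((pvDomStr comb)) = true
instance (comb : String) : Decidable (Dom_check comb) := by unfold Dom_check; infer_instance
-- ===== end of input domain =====

-- B differs from A by a build-table-then-reduce decomposition (prefix balances first, then one reduction, output by a separate map); same O(n) cost.

-- ===== PORT A =====
-- literal port of A's loop: output accumulator srepr, running counter, early return on counter < 0
def checkGo : List Char → List Char → Int → Option String
  | [], srepr, counter => if counter = 0 then some (String.mk srepr) else none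
  | i :: rest, srepr, counter =>
    let st := if i == '0' then (srepr ++ [')'], counter - 1) else (srepr ++ ['('], counter + 1)
    if st.2 < 0 then none else checkGo rest st.1 st.2

def check (comb : String) : Option String := checkGo comb.toList [] 0

-- ===== PORT B =====
def check_alt (comb : String) : Option String :=
  let st := comb.toList.foldl
    (fun (st : Int × List Int) c =>
      let t := st.1 + (if c == '0' then (-1 : Int) else 1)
      (t, st.2 ++ [t])) (0, [])
  if st.1 ≠ 0 ∨ st.2.any (fun p => p < 0) then none
  else some (String.mk (comb.toList.map (fun c => if c == '0' then ')' else '(')))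

-- ===== PRECONDITION & SPEC =====
def Spec_check (comb : String) (out : Option String) : Prop := out = check_alt comb
instance (comb : String) (out : Option String) : Decidable (Spec_check comb out) := by unfold Spec_check; infer_instance

-- ===== CLAIM (what is proved, stated in full; the proofs are below) =====
def Claim_equal_check : Prop := ∀ (comb : String), Dom_check comb → Spec_check comb (check comb)

-- ===== LEMMAS AND PROOFS =====

def pvDelta (c : Char) : Int := if c == '0' then -1 else 1

def pvPrefs : Int → List Char → List Int
  | _, [] => []
  | c, x :: xs => (c + pvDelta x) :: pvPrefs (c + pvDelta x) xs

def pvBal : List Char → Int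
  | [] => 0
  | x :: xs => pvDelta x + pvBal xs

def pvParen (c : Char) : Char := if c == '0' then ')' else '('

lemma checkGo_char : ∀ (l : List Char) (srepr : List Char) (c : Int),
    checkGo l srepr c =
      if (pvPrefs c l).any (fun p => decide (p < 0)) then none
      else if c + pvBal l ≠ 0 then none
      else some (String.mk (srepr ++ l.map pvParen)) := by
  intro l
  induction l with
  | nil =>
    intro srepr c
    by_cases h : c = 0 <;> simp [checkGo, pvPrefs, pvBal, h]
  | cons x xs ih =>
    intro srepr c
    have hd : c + pvDelta x = if x == '0' then c - 1 else c + 1 := by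
      by_cases hx : x == '0' <;> simp [pvDelta, hx] <;> ring
    by_cases hx : x == '0'
    · simp only [checkGo, hx, if_true, pvPrefs, pvBal, hd, List.any_cons, List.map_cons]
      by_cases hneg : c - 1 < 0
      · simp [hneg]
      · rw [ih]
        have h1 : ¬ (decide (c - 1 < 0) = true) := by simpa using hneg
        have h2 : c + (pvDelta x + pvBal xs) = c - 1 + pvBal xs := by simp [pvDelta, hx]; ring
        simp [hneg, h2, pvParen, hx]
    · simp only [checkGo, hx, pvPrefs, pvBal, hd, List.any_cons, List.map_cons]
      by_cases hneg : c + 1 < 0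
      · simp [hneg]
      · rw [ih]
        have h1 : ¬ (decide (c + 1 < 0) = true) := by simpa using hneg
        have h2 : c + (pvDelta x + pvBal xs) = c + 1 + pvBal xs := by simp [pvDelta, hx]; ring
        simp [hneg, h2, pvParen, hx]

lemma foldl_prefs : ∀ (l : List Char) (c : Int) (acc : List Int),
    l.foldl (fun (st : Int × List Int) ch =>
      let t := st.1 + (if ch == '0' then (-1 : Int) else 1)
      (t, st.2 ++ [t])) (c, acc) = (c + pvBal l, acc ++ pvPrefs c l) := by
  intro l
  induction l with
  | nil => intro c acc; simp [pvBal, pvPrefs]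
  | cons x xs ih =>
    intro c acc
    simp only [List.foldl_cons]
    rw [ih]
    simp [pvBal, pvPrefs, pvDelta]
    ring

lemma paren_eq (l : List Char) : l.map pvParen = l.map (fun c => if c == '0' then ')' else '(') := by
  simp [pvParen]

-- ===== VERDICT (by name: the statement is the Claim_ definition above) =====
theorem check_spec : Claim_equal_check := by
  intro comb _
  unfold Spec_check check check_alt
  rw [checkGo_char, foldl_prefs]
  simp only [List.nil_append, zero_add, ← paren_eq]
  by_cases hany : (pvPrefs 0 comb.toList).any (fun p => decide (p < 0)) <;>
    by_cases hbal : pvBal comb.toList = 0 <;>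
      simp [hany, hbal]
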